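-- pv_equiv track=rewrite | github.com/SashoStoichkovArchive/TUES_11_TP | homework_1/task2.py | strongRelation
-- ===== SOURCE A (Python) =====
-- def has_same_ingredients(medicine1, medicine2):
--
--     medicine1[1].sort()
--     medicine2[1].sort()
--
--     if len(medicine1[1]) <= len(medicine2[1]):
--         for i in range(len(medicine1[1])):
--             if medicine2[1][i][0] != medicine1[1][i][0]:
--                 return False
--         return True
--     else:
--         return False
--
-- def isStronger(medicine1, medicine2):
--     sum_of_divs = 0
--
--     if has_same_ingredients(medicine2, medicine1):
--         for i in range(len(medicine2[1])):
--             sum_of_divs += medicine1[1][i][1] - medicine2[1][i][1]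
--
--         if sum_of_divs > 0:
--             return True
--         else:
--             return False
--
--     else:
--         return False
--
-- def strongRelation(list_of_medicines):
--     result = list()
--
--     for medicine in list_of_medicines:
--         stronger_medicines = list()
--
--         for med in list_of_medicines:
--             if isStronger(med, medicine) is True:
--                 stronger_medicines.append(med[0])
--
--         result.append((medicine, stronger_medicines))
--
--     return result
-- ===== SOURCE B (Python) =====
-- # B: pre-sort each ingredient list once, then build one dict mapping every sorted
-- # name-prefix to the (medicine name, prefix dosage sum) entries having it; each
-- # medicine's "stronger" list is a single dict lookup + threshold filter, instead
-- # of A's O(n^2) pairwise re-sort-and-compare.  Mutates ingredient lists (sorts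
-- # them in place) exactly as A does.
-- def strongRelation(list_of_medicines):
--     for med in list_of_medicines:
--         med[1].sort()
--
--     index = {}
--     for med in list_of_medicines:
--         index[()] = index.get((), []) + [(med[0], 0)]
--         key, ps = (), 0
--         for ing_name, dose in med[1]:
--             key += (ing_name,)
--             ps += dose
--             index[key] = index.get(key, []) + [(med[0], ps)]
--
--     result = []
--     for med in list_of_medicines:
--         nm = tuple(x[0] for x in med[1])
--         tot = sum(x[1] for x in med[1])
--         stronger = [name for name, ps in index.get(nm, []) if ps - tot > 0]
--         result.append((med, stronger))
--     return result
-- ===== Notes on version B (the rewrite author's own statement) =====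
-- stated objective: faster
-- what changed: Instead of re-sorting and comparing every pair of medicines, B sorts each ingredient list once, builds a single dict from every sorted name-prefix to (medicine name, prefix dosage sum) entries, and answers each medicine with one dict lookup plus a threshold filter.
import Mathlib
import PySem

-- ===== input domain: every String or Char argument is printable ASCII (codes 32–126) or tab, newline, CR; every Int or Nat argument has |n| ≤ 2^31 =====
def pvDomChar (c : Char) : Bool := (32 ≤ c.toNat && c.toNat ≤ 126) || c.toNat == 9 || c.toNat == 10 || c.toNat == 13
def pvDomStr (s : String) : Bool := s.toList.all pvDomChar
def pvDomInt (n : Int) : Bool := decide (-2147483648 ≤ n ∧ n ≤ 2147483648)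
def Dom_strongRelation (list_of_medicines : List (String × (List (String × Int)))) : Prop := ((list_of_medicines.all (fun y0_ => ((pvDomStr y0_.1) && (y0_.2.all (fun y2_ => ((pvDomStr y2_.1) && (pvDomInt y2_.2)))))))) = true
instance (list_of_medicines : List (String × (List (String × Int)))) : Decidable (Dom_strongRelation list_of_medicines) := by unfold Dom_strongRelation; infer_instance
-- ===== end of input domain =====

-- B pre-sorts once and indexes every sorted name-prefix in a dict, replacing A's
-- pairwise re-sort-and-compare; both Pythons sort the ingredient lists in place —
-- the equivalence proved here is about the RETURN value (which contains the sorted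
-- lists in both versions).

-- ===== PORT A =====
-- Python's in-place medicine[1].sort() (tuples sorted lexicographically) is modelled
-- by taking the sorted copy at each use: the sort is idempotent, every comparison in A
-- happens after both lists involved have been sorted, and each medicine appended to the
-- result has been sorted (the inner loop runs at least once for every outer element).
-- 'for i in range(len(m1[1])): if m2[1][i][0] != m1[1][i][0]: return False' under the
-- guard len(m1[1]) <= len(m2[1]): walk both sorted lists in step, comparing names.
def pvNamesAgree : List (String × Int) → List (String × Int) → Bool
  | [], _ => true
  | _ :: _, [] => true            -- unreachable under the length guard
  | a :: s1, b :: s2 => if b.1 != a.1 then false else pvNamesAgree s1 s2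

def pvHasSameIngredients (m1 m2 : String × (List (String × Int))) : Bool :=
  let s1 := PySem.List.sorted2 m1.2 Prod.fst Prod.snd
  let s2 := PySem.List.sorted2 m2.2 Prod.fst Prod.snd
  if s1.length ≤ s2.length then pvNamesAgree s1 s2 else false

-- 'for i in range(len(m2[1])): sum += m1[1][i][1] - m2[1][i][1]' on the sorted lists:
-- zipWith truncates at len(m2[1]) because the guard ensures len(m2[1]) <= len(m1[1]).
def pvIsStronger (m1 m2 : String × (List (String × Int))) : Bool :=
  if pvHasSameIngredients m2 m1 then
    let s1 := PySem.List.sorted2 m1.2 Prod.fst Prod.snd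
    let s2 := PySem.List.sorted2 m2.2 Prod.fst Prod.snd
    let sum_of_divs : Int := (List.zipWith (fun a b => a.2 - b.2) s1 s2).sum
    if sum_of_divs > 0 then true else false
  else false

def strongRelation (list_of_medicines : List (String × (List (String × Int)))) : List ((String × (List (String × Int))) × List String) :=
  list_of_medicines.foldl (fun result medicine =>
    result ++ [((medicine.1, PySem.List.sorted2 medicine.2 Prod.fst Prod.snd),
      list_of_medicines.foldl (fun stronger_medicines med =>
        if pvIsStronger med medicine then stronger_medicines ++ [med.1] else stronger_medicines) [])]) []

-- ===== PORT B =====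
def pvSortIngs (m : String × (List (String × Int))) : String × (List (String × Int)) :=
  (m.1, PySem.List.sorted2 m.2 Prod.fst Prod.snd)

-- one medicine's pass of Source B's index-building loop: insert (name, prefix dosage sum)
-- under every prefix of its sorted ingredient-name tuple (index[key] = index.get(key, []) + [v])
def pvIndexMed (d : PySem.Dict (List String) (List (String × Int))) (m : String × (List (String × Int))) : PySem.Dict (List String) (List (String × Int)) :=
  let d0 := d.modify [] [] (· ++ [(m.1, 0)])
  (m.2.foldl (fun st x =>
      (st.1 ++ [x.1], st.2.1 + x.2, st.2.2.modify (st.1 ++ [x.1]) [] (· ++ [(m.1, st.2.1 + x.2)])))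
    (([] : List String), (0 : Int), d0)).2.2

def strongRelation_alt (list_of_medicines : List (String × (List (String × Int)))) : List ((String × (List (String × Int))) × List String) :=
  let sortedMeds := list_of_medicines.map pvSortIngs      -- 'for med: med[1].sort()'
  let index := sortedMeds.foldl pvIndexMed PySem.Dict.empty
  sortedMeds.foldl (fun result med =>
    let nm := med.2.map Prod.fst
    let tot := (med.2.map Prod.snd).sum
    let stronger := (index.getD nm []).foldl (fun acc e =>
        if e.2 - tot > 0 then acc ++ [e.1] else acc) []
    result ++ [(med, stronger)]) []

-- ===== PRECONDITION & SPEC =====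
def Spec_strongRelation (list_of_medicines : List (String × (List (String × Int)))) (out : List ((String × (List (String × Int))) × List String)) : Prop := out = strongRelation_alt list_of_medicines
instance (list_of_medicines : List (String × (List (String × Int)))) (out : List ((String × (List (String × Int))) × List String)) : Decidable (Spec_strongRelation list_of_medicines out) := by unfold Spec_strongRelation; infer_instance

-- ===== CLAIM (what is proved, stated in full; the proofs are below) =====
def Claim_equal_strongRelation : Prop := ∀ (list_of_medicines : List (String × (List (String × Int)))), Dom_strongRelation list_of_medicines → Spec_strongRelation list_of_medicines (strongRelation list_of_medicines)

-- ===== LEMMAS AND PROOFS =====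

-- names-agreement on the first |s| positions is the prefix condition on the name lists
theorem pvNamesAgree_iff (s t : List (String × Int)) (h : s.length ≤ t.length) :
    pvNamesAgree s t = true ↔ (t.map Prod.fst).take s.length = s.map Prod.fst := by
  induction s generalizing t with
  | nil => simp [pvNamesAgree]
  | cons a s1 ih =>
    cases t with
    | nil => simp at h
    | cons b s2 =>
      simp only [List.length_cons, Nat.add_le_add_iff_right] at h
      simp only [pvNamesAgree, List.map_cons, List.length_cons, List.take_succ_cons,
        List.cons.injEq]
      cases hba : b.1 == a.1 with
      | false =>
        simp only [bne, hba, Bool.not_false, if_true]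
        have : ¬ b.1 = a.1 := by simpa using hba
        simp [this]
      | true =>
        have hb : b.1 = a.1 := by simpa using hba
        simp [bne, hb, ih s2 h]

-- the guarded prefix test: take-equality already forces the length inequality
theorem take_map_eq_length_le {α β : Type} (f : α → β) (K : List β) (t : List α)
    (h : (t.map f).take K.length = K) : K.length ≤ t.length := by
  have := congrArg List.length h
  simp at this
  omega

theorem sum_zipWith_sub (s t : List (String × Int)) (h : s.length ≤ t.length) :
    (List.zipWith (fun a b => a.2 - b.2) t s).sum
      = ((t.map Prod.snd).take s.length).sum - (s.map Prod.snd).sum := by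
  induction s generalizing t with
  | nil => simp
  | cons a s1 ih =>
    cases t with
    | nil => simp at h
    | cons b s2 =>
      simp only [List.length_cons, Nat.add_le_add_iff_right] at h
      simp only [List.zipWith_cons_cons, List.sum_cons, List.map_cons, List.length_cons,
        List.take_succ_cons, ih s2 h]
      ring

-- characterisation of A's pairwise test in terms of sorted name lists and prefix sums
theorem isStronger_char (mj mi : String × (List (String × Int))) :
    pvIsStronger mj mi =
      (decide (((PySem.List.sorted2 mj.2 Prod.fst Prod.snd).map Prod.fst).take
          ((PySem.List.sorted2 mi.2 Prod.fst Prod.snd).map Prod.fst).length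
          = (PySem.List.sorted2 mi.2 Prod.fst Prod.snd).map Prod.fst)
       && decide ((((PySem.List.sorted2 mj.2 Prod.fst Prod.snd).map Prod.snd).take
            ((PySem.List.sorted2 mi.2 Prod.fst Prod.snd).map Prod.fst).length).sum
          - ((PySem.List.sorted2 mi.2 Prod.fst Prod.snd).map Prod.snd).sum > 0)) := by
  unfold pvIsStronger pvHasSameIngredients
  generalize (PySem.List.sorted2 mj.2 Prod.fst Prod.snd) = sj
  generalize (PySem.List.sorted2 mi.2 Prod.fst Prod.snd) = si
  dsimp only
  by_cases hlen : si.length ≤ sj.length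
  · by_cases hag : pvNamesAgree si sj = true
    · have htake := (pvNamesAgree_iff si sj hlen).mp hag
      have hsum := sum_zipWith_sub si sj hlen
      simp [hlen, hag, htake, hsum, List.length_map]
    · have hag' : pvNamesAgree si sj = false := by simpa using hag
      have htake : ¬ ((sj.map Prod.fst).take si.length = si.map Prod.fst) := by
        intro hc
        exact hag ((pvNamesAgree_iff si sj hlen).mpr hc)
      simp [hlen, hag', htake]
  · have htake : ¬ ((sj.map Prod.fst).take si.length = si.map Prod.fst) := by
      intro hc
      apply hlen
      have h1 := take_map_eq_length_le Prod.fst (si.map Prod.fst) sj (by simpa using hc)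
      simpa using h1
    simp [hlen, htake]

-- effect of one medicine's prefix-insertion fold on one dict key
theorem pvIndexMed_fold (name : String) (s : List (String × Int)) (k0 : List String) (p0 : Int)
    (d : PySem.Dict (List String) (List (String × Int))) (K : List String) :
    ((s.foldl (fun st x =>
        (st.1 ++ [x.1], st.2.1 + x.2, st.2.2.modify (st.1 ++ [x.1]) [] (· ++ [(name, st.2.1 + x.2)])))
      (k0, p0, d)).2.2).getD K []
    = d.getD K [] ++
      (if K.length > k0.length ∧ K.length ≤ k0.length + s.length ∧
          K = k0 ++ (s.map Prod.fst).take (K.length - k0.length)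
       then [(name, p0 + ((s.map Prod.snd).take (K.length - k0.length)).sum)] else []) := by
  induction s generalizing k0 p0 d with
  | nil =>
    simp only [List.foldl_nil, List.length_nil, Nat.add_zero]
    rw [if_neg (by rintro ⟨h1, h2, _⟩; omega)]
    simp
  | cons x s' ih =>
    simp only [List.foldl_cons]
    rw [ih, PySem.Dict.getD_modify]
    by_cases hK : K = k0 ++ [x.1]
    · have hKlen : K.length = k0.length + 1 := by subst hK; simp
      rw [if_pos hK]
      rw [if_neg (by rintro ⟨h1, _, _⟩; simp at h1; omega)]
      have hm : K.length - k0.length = 1 := by omega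
      rw [if_pos ?_]
      · simp [hK]
      · refine ⟨by omega, by simp; omega, ?_⟩
        rw [hm]
        simpa using hK
    · rw [if_neg hK]
      congr 1
      by_cases h1 : k0.length + 1 < K.length
      · have hm : K.length - k0.length = (K.length - (k0.length + 1)) + 1 := by omega
        rw [hm]
        simp only [List.map_cons, List.take_succ_cons, List.sum_cons, List.length_append,
          List.length_cons, List.length_nil, Nat.zero_add, ← List.append_cons]
        refine if_congr (and_congr (by omega) (and_congr (by omega) Iff.rfl)) (by rw [add_assoc]) rfl
      · rw [if_neg (by rintro ⟨ha, _, _⟩; simp at ha; omega)]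
        rw [if_neg ?_]
        rintro ⟨ha, hb, hc⟩
        have hm : K.length - k0.length = 1 := by omega
        rw [hm] at hc
        simp at hc
        exact hK hc

-- effect of indexing one medicine on one dict key
theorem pvIndexMed_getD (d : PySem.Dict (List String) (List (String × Int)))
    (m : String × (List (String × Int))) (K : List String) :
    (pvIndexMed d m).getD K []
      = d.getD K [] ++
        (if (m.2.map Prod.fst).take K.length == K
         then [(m.1, ((m.2.map Prod.snd).take K.length).sum)] else []) := by
  unfold pvIndexMed
  dsimp only
  rw [pvIndexMed_fold, PySem.Dict.getD_modify]
  simp only [List.length_nil, List.nil_append, Nat.sub_zero, gt_iff_lt, zero_add]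
  by_cases hK : K = []
  · subst hK
    rw [if_pos rfl, if_neg (by rintro ⟨h1, _, _⟩; simp at h1)]
    simp
  · rw [if_neg hK]
    by_cases hc : (m.2.map Prod.fst).take K.length = K
    · have hlen : K.length ≤ m.2.length := by
        simpa using take_map_eq_length_le Prod.fst K m.2 hc
      have hbeq : ((m.2.map Prod.fst).take K.length == K) = true := beq_iff_eq.mpr hc
      have hcond : 0 < K.length ∧ K.length ≤ m.2.length ∧ K = (m.2.map Prod.fst).take K.length :=
        ⟨List.length_pos_of_ne_nil hK, hlen, hc.symm⟩
      rw [if_pos hcond, if_pos hbeq]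
    · have hbeq : ((m.2.map Prod.fst).take K.length == K) = false := by
        simpa using hc
      rw [if_neg (by rintro ⟨_, _, h3⟩; exact hc h3.symm), hbeq]
      simp

-- dict lookup after indexing all medicines
theorem index_getD (ms : List (String × (List (String × Int)))) (d : PySem.Dict (List String) (List (String × Int))) (K : List String) :
    (ms.foldl pvIndexMed d).getD K []
      = d.getD K [] ++ (ms.filter (fun m => (m.2.map Prod.fst).take K.length == K)).map
          (fun m => (m.1, ((m.2.map Prod.snd).take K.length).sum)) := by
  induction ms generalizing d with
  | nil => simp
  | cons m rest ih =>
    simp only [List.foldl_cons, List.filter_cons]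
    rw [ih, pvIndexMed_getD]
    by_cases hc : ((m.2.map Prod.fst).take K.length == K) = true
    · simp [hc, List.append_assoc]
    · simp only [Bool.not_eq_true] at hc
      simp [hc]

-- B's inner threshold loop as a filter (specialisation of PySem.List.foldl_append_ite)
theorem foldB (xs : List (String × Int)) (tot : Int) (acc : List String) :
    xs.foldl (fun acc e => if e.2 - tot > 0 then acc ++ [e.1] else acc) acc
      = acc ++ (xs.filter (fun e => decide (e.2 - tot > 0))).map Prod.fst :=
  PySem.List.foldl_append_ite _ _ _ _

theorem beq_list_eq_decide (a b : List String) : (a == b) = decide (a = b) := by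
  by_cases h : a = b <;> simp [h]

-- ===== VERDICT (by name: the statement is the Claim_ definition above) =====
theorem strongRelation_spec : Claim_equal_strongRelation := by
  intro l _hDom
  unfold Spec_strongRelation strongRelation strongRelation_alt
  dsimp only
  rw [PySem.List.foldl_append_singleton_eq_map, PySem.List.foldl_append_singleton_eq_map]
  rw [List.map_map]
  refine List.map_congr_left (fun mi _ => ?_)
  dsimp only [Function.comp, pvSortIngs]
  congr 1
  rw [PySem.List.foldl_append_if]
  rw [index_getD, PySem.Dict.getD_empty]
  refine Eq.trans ?_ (foldB _ _ _).symm
  simp only [List.nil_append, List.filter_map, List.map_map, List.filter_filter]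
  dsimp only [Function.comp]
  congr 1
  refine List.filter_congr (fun mj _ => ?_)
  rw [isStronger_char, beq_list_eq_decide]
  dsimp only [pvSortIngs]
  exact Bool.and_comm _ _
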